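-- pv_equiv track=rewrite | github.com/aw183052/cmsc423_display | reverse_bwt.py | label_elements
-- ===== SOURCE A (Python) =====
-- def label_elements(bwt):
--     count = dict()
--     new_list = []
--
--     for x in bwt:
--         if x in count:
--             count[x] += 1
--         else:
--             count[x] = 1
--
--     for i in range(len(bwt)):
--         cur = bwt[i]
--         new_list.append(bwt[i] + str(count[cur]))
--         count[cur] -= 1
--
--     return new_list
-- ===== SOURCE B (Python) =====
-- def label_elements(bwt):
--     # Single backward pass: the last occurrence of x gets rank 1, earlier ones
--     # successively larger, which are exactly A's descending ranks; reverse at the end.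
--     seen = {}
--     out = []
--     for x in reversed(bwt):
--         seen[x] = seen.get(x, 0) + 1
--         out.append(x + str(seen[x]))
--     out.reverse()
--     return out
-- ===== Notes on version B (the rewrite author's own statement) =====
-- stated objective: alternative
-- what changed: Replaces A's two forward passes (precompute totals, then look up and decrement) by a single backward pass that maintains only running suffix counts and reverses the collected labels.
import Mathlib
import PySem

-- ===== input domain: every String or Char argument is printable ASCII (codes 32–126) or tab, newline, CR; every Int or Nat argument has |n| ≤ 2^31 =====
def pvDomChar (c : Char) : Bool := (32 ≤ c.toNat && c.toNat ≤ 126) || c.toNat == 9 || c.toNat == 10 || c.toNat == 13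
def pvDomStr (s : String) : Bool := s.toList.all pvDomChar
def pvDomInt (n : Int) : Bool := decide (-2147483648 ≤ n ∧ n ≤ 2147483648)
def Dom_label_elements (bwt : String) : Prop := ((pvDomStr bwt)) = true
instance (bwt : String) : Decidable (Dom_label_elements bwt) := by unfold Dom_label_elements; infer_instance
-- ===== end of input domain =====

-- B replaces A's two forward passes by one backward pass with running suffix counts ('alternative', not faster).

-- ===== PORT A =====
-- first loop: 'if x in count: count[x] += 1 else: count[x] = 1'
def labelA_count (cs : List Char) : PySem.Dict Char Int :=
  cs.foldl (fun d x => if d.contains x then d.modify x 0 (· + 1) else d.insert x 1)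
    PySem.Dict.empty

-- second loop: 'for i in range(len(bwt))' reads bwt[i] for i = 0,1,…, i.e. visits the
-- characters in order; count[cur] is always present, so the lookup is getD _ 0 exactly.
def labelA_loop : List Char → PySem.Dict Char Int → List String
  | [], _ => []
  | c :: rest, d =>
      String.mk (c :: PySem.Int.toChars (d.getD c 0)) :: labelA_loop rest (d.modify c 0 (· - 1))

def label_elements (bwt : String) : List String :=
  labelA_loop bwt.toList (labelA_count bwt.toList)

-- ===== PORT B =====
-- 'for x in reversed(bwt): seen[x] = seen.get(x,0)+1; out.append(x + str(seen[x]))'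
def labelB_loop : List Char → PySem.Dict Char Int → List String
  | [], _ => []
  | x :: rest, d =>
      let d' := d.modify x 0 (· + 1)
      String.mk (x :: PySem.Int.toChars (d'.getD x 0)) :: labelB_loop rest d'

def label_elements_alt (bwt : String) : List String :=
  (labelB_loop bwt.toList.reverse PySem.Dict.empty).reverse

-- ===== PRECONDITION & SPEC =====
def Spec_label_elements (bwt : String) (out : List String) : Prop := out = label_elements_alt bwt
instance (bwt : String) (out : List String) : Decidable (Spec_label_elements bwt out) := by unfold Spec_label_elements; infer_instance

-- ===== CLAIM (what is proved, stated in full; the proofs are below) =====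
def Claim_equal_label_elements : Prop := ∀ (bwt : String), Dom_label_elements bwt → Spec_label_elements bwt (label_elements bwt)

-- ===== LEMMAS AND PROOFS =====

-- reference: label at each position is the char's count in the suffix starting there, plus d's offset
def labelRef (d : PySem.Dict Char Int) : List Char → List String
  | [] => []
  | c :: rest => String.mk (c :: PySem.Int.toChars (d.getD c 0 + (rest.count c + 1))) :: labelRef d rest

lemma labelA_count_getD (cs : List Char) (d : PySem.Dict Char Int) (v : Char) :
    (cs.foldl (fun d x => if d.contains x then d.modify x 0 (· + 1) else d.insert x 1) d).getD v 0
      = d.getD v 0 + cs.count v := by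
  induction cs generalizing d with
  | nil => simp
  | cons x rest ih =>
      simp only [List.foldl_cons, ih, List.count_cons]
      by_cases hc : d.contains x = true
      · rw [if_pos hc, PySem.Dict.getD_modify]
        by_cases hv : v = x
        · subst hv; simp; ring
        · simp [hv, Ne.symm hv]
      · rw [if_neg hc, PySem.Dict.getD_insert]
        by_cases hv : v = x
        · subst hv
          have h0 : d.getD v 0 = 0 :=
            PySem.Dict.getD_of_not_contains d 0 (by simpa using hc)
          simp [h0]; ring
        · simp [hv, Ne.symm hv]

lemma labelA_loop_eq_ref (cs : List Char) (d d0 : PySem.Dict Char Int)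
    (h : ∀ v, d.getD v 0 = d0.getD v 0 + cs.count v) :
    labelA_loop cs d = labelRef d0 cs := by
  induction cs generalizing d with
  | nil => rfl
  | cons c rest ih =>
      have hc := h c
      rw [List.count_cons_self] at hc
      simp only [labelA_loop, labelRef]
      rw [hc]
      congr 1
      apply ih
      intro v
      rw [PySem.Dict.getD_modify]
      by_cases hv : v = c
      · subst hv; rw [if_pos rfl, hc]; push_cast; ring
      · rw [if_neg hv]
        have hvv := h v
        rw [List.count_cons_of_ne (Ne.symm hv)] at hvv
        exact hvv

lemma labelRef_append_singleton (d : PySem.Dict Char Int) (init : List Char) (x : Char) :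
    labelRef d (init ++ [x])
      = labelRef (d.modify x 0 (· + 1)) init
        ++ [String.mk (x :: PySem.Int.toChars ((d.modify x 0 (· + 1)).getD x 0))] := by
  induction init with
  | nil =>
      simp [labelRef]
  | cons c rest ih =>
      have hhead : (d.modify x 0 (· + 1)).getD c 0 + ((rest.count c : Int) + 1)
          = d.getD c 0 + (((rest ++ [x]).count c : Int) + 1) := by
        rw [PySem.Dict.getD_modify]
        by_cases hv : c = x
        · subst hv; simp [List.count_append]; ring
        · simp [if_neg hv, List.count_append, Ne.symm hv]
      simp only [List.cons_append, labelRef, ih, List.cons_append]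
      rw [hhead]

lemma labelB_loop_reverse (cs : List Char) (d : PySem.Dict Char Int) :
    (labelB_loop cs.reverse d).reverse = labelRef d cs := by
  induction cs using List.reverseRecOn generalizing d with
  | nil => rfl
  | append_singleton init x ih =>
      rw [List.reverse_append, List.reverse_singleton, List.singleton_append]
      simp only [labelB_loop, List.reverse_cons]
      rw [ih, labelRef_append_singleton]

-- ===== VERDICT (by name: the statement is the Claim_ definition above) =====
theorem label_elements_spec : Claim_equal_label_elements := by
  intro bwt _
  unfold Spec_label_elements label_elements label_elements_alt labelA_count
  rw [labelB_loop_reverse]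
  apply labelA_loop_eq_ref
  intro v
  rw [labelA_count_getD]
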